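-- pv_equiv track=rewrite | github.com/jramaswami/Binary_Search_Python | longest_equivalent_sublist_after_k_increments.py | solve
-- ===== SOURCE A (Python) =====
-- import collections
-- import heapq
--
-- HItem = collections.namedtuple('HItem', ['val', 'index'])
--
-- class MaxPriorityQueue:
--
--     def __init__(self):
--         self.heap = []
--
--     def push(self, item):
--         heapq.heappush(self.heap, (-item.val, item))
--
--     def pop(self):
--         heapq.heappop(self.heap)
--
--     def top(self):
--         if not self.heap:
--             return None
--         return self.heap[0][1]
--
-- def solve(nums, k):
--     window = collections.deque()
--     curr_sum = 0
--     curr_maxs= MaxPriorityQueue()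
--     soln = 0
--     for i, n in enumerate(nums):
--         item = HItem(n, i)
--         window.append(item)
--         curr_sum += item.val
--         curr_maxs.push(item)
--         delta = ((curr_maxs.top().val * len(window)) - curr_sum)
--         while delta > k:
--             curr_sum -= window[0].val
--             window.popleft()
--             while curr_maxs.top().index < window[0].index:
--                 curr_maxs.pop()
--             delta = ((curr_maxs.top()[0] * len(window)) - curr_sum)
--         soln = max(soln, len(window))
--     return soln
-- ===== SOURCE B (Python) =====
-- def solve(nums, k):
--     # Plain two-pointer sliding window: no heap, no deque of items.
--     # The window [left, right] is shrunk while it cannot be equalized with <= k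
--     # increments; the window maximum is recomputed directly from the slice.
--     soln = 0
--     left = 0
--     curr_sum = 0
--     for right, n in enumerate(nums):
--         curr_sum += n
--         while max(nums[left:right + 1]) * (right + 1 - left) - curr_sum > k:
--             curr_sum -= nums[left]
--             left += 1
--         soln = max(soln, right + 1 - left)
--     return soln
-- ===== Notes on version B (the rewrite author's own statement) =====
-- stated objective: simpler
-- what changed: Replaces A's MaxPriorityQueue (heapq with lazy deletion) and deque of (val,index) items by a plain two-pointer sliding window over the list itself whose maximum is recomputed from the current slice.
import Mathlib
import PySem

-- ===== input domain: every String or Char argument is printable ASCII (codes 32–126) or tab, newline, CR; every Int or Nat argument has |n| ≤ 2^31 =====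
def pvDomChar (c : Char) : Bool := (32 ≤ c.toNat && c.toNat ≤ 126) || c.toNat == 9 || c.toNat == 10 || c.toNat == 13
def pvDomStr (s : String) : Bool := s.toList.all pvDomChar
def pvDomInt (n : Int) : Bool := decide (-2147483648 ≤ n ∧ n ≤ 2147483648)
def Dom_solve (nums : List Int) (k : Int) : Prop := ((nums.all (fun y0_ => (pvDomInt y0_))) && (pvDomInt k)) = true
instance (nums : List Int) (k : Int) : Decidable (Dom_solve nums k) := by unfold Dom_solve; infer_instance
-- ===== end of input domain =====

-- B replaces A's heap-with-lazy-deletion machinery by a plain two-pointer window whose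
-- maximum is recomputed from the slice: simpler (no priority queue, no item deque).


-- ===== PORT A =====
-- A's MaxPriorityQueue pushes (-item.val, item) into a heapq and only ever reads/pops the
-- heap minimum (heap[0] / heappop).  We model the heap by its content list: `heapTop` is the
-- minimum under the pushed key (-val, (val, index)) — i.e. largest val, then smallest index —
-- and popping erases that element.  This is exact for the push/top/pop API A uses.
def hlt (p q : Int × Int) : Bool :=
  if p.1 ≠ q.1 then decide (q.1 < p.1) else decide (p.2 < q.2)

def heapTop : List (Int × Int) → Option (Int × Int)
  | [] => none
  | p :: rest =>
    match heapTop rest with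
    | none => some p
    | some q => if hlt q p then some q else some p

theorem heapTop_mem {h : List (Int × Int)} {t : Int × Int} :
    heapTop h = some t → t ∈ h := by
  induction h with
  | nil => simp [heapTop]
  | cons p rest ih =>
    simp only [heapTop]
    cases hr : heapTop rest with
    | none => intro h1; simp at h1; simp [h1]
    | some q =>
      intro h1
      by_cases hb : hlt q p = true
      · simp [hb] at h1; subst h1; exact List.mem_cons_of_mem _ (ih hr)
      · simp [hb] at h1; simp [h1]

-- the inner `while curr_maxs.top().index < window[0].index: curr_maxs.pop()` loop
def purge (maxs : List (Int × Int)) (bound : Int) : List (Int × Int) :=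
  match hm : heapTop maxs with
  | none => maxs   -- Python would dereference None here; unreachable under Pre_
  | some t =>
    if t.2 < bound then purge (maxs.erase t) bound else maxs
termination_by maxs.length
decreasing_by
  have := List.length_erase_of_mem (heapTop_mem hm)
  have : maxs.length ≠ 0 := by
    intro h0; rw [List.length_eq_zero_iff] at h0; subst h0; simp [heapTop] at hm
  omega

-- the outer `while delta > k` loop (delta recomputed from the unchanged state at entry)
def shrink (k : Int) (window : List (Int × Int)) (sum : Int) (maxs : List (Int × Int)) :
    List (Int × Int) × Int × List (Int × Int) :=
  match heapTop maxs with
  | none => (window, sum, maxs)   -- Python raises AttributeError; unreachable under Pre_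
  | some t =>
    if t.1 * (window.length : Int) - sum > k then
      match window with
      | [] => (window, sum, maxs)   -- Python raises IndexError; unreachable under Pre_
      | w0 :: rest =>
        match rest with
        | [] => (rest, sum - w0.1, maxs)  -- Python raises IndexError; unreachable under Pre_
        | w1 :: _ => shrink k rest (sum - w0.1) (purge maxs w1.2)
    else (window, sum, maxs)

-- one iteration of A's `for i, n in enumerate(nums)` body; state = (window, curr_sum, maxs, soln)
def stepA (k : Int) (st : List (Int × Int) × Int × List (Int × Int) × Int) (p : Int × Int) :
    List (Int × Int) × Int × List (Int × Int) × Int :=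
  let item : Int × Int := (p.2, p.1)
  let window := st.1 ++ [item]
  let sum := st.2.1 + item.1
  let maxs := st.2.2.1 ++ [item]
  let r := shrink k window sum maxs
  (r.1, r.2.1, r.2.2, max st.2.2.2 (r.1.length : Int))

def solve (nums : List Int) (k : Int) : Int :=
  ((PySem.List.enumerate nums 0).foldl (stepA k) ([], 0, [], 0)).2.2.2

-- ===== PORT B =====
-- the `while max(nums[left:right+1]) * (right+1-left) - curr_sum > k` loop of Source B
def shrinkB (nums : List Int) (k : Int) (right : Int) (left : Nat) (s : Int) : Nat × Int :=
  match hmx : PySem.List.max? (PySem.List.slice nums (some (left : Int)) (some (right + 1))) (fun x => x) with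
  | none => (left, s)   -- Python max([]) raises ValueError; unreachable under Pre_
  | some m =>
    if m * (right + 1 - (left : Int)) - s > k then
      shrinkB nums k right (left + 1) (s - PySem.List.pyGetD nums (left : Int) 0)
    else (left, s)
termination_by (PySem.List.slice nums (some (left : Int)) (some (right + 1))).length
decreasing_by
  have hne : PySem.List.slice nums (some (left : Int)) (some (right + 1)) ≠ [] := by
    intro h0
    rw [h0] at hmx
    rw [(PySem.List.max?_eq_none_iff ([] : List Int) (fun x => x)).symm.mpr rfl] at hmx
    cases hmx
  have hlen : 0 < (PySem.List.slice nums (some (left : Int)) (some (right + 1))).length :=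
    List.length_pos_iff.2 hne
  rw [PySem.List.length_slice, PySem.List.clampIdx_natCast] at hlen ⊢
  rw [PySem.List.length_slice, PySem.List.clampIdx_natCast]
  have h1 := PySem.List.clampIdx_le nums.length (right + 1)
  omega

-- one iteration of Source B's loop; state = (left, curr_sum, soln)
def stepB (nums : List Int) (k : Int) (st : Nat × Int × Int) (p : Int × Int) : Nat × Int × Int :=
  let s := st.2.1 + p.2
  let r := shrinkB nums k p.1 st.1 s
  (r.1, r.2, max st.2.2 (p.1 + 1 - (r.1 : Int)))

def solve_alt (nums : List Int) (k : Int) : Int :=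
  ((PySem.List.enumerate nums 0).foldl (stepB nums k) (0, 0, 0)).2.2

-- ===== PRECONDITION & SPEC =====
-- Pre_ excludes exactly the inputs on which A raises (k < 0 with a nonempty list: the window
-- is shrunk until it is empty and window[0] raises IndexError; B's max([]) raises there too).
def Pre_solve (nums : List Int) (k : Int) : Prop := 0 ≤ k ∨ nums = []
instance (nums : List Int) (k : Int) : Decidable (Pre_solve nums k) := by unfold Pre_solve; infer_instance

def pvWitness_solve : List Int × Int := ([4, 1, 1, 2, 4, 0, 3], 5)

def Spec_solve (nums : List Int) (k : Int) (out : Int) : Prop := out = solve_alt nums k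
instance (nums : List Int) (k : Int) (out : Int) : Decidable (Spec_solve nums k out) := by unfold Spec_solve; infer_instance

-- ===== CLAIM (what is proved, stated in full; the proofs are below) =====
def Claim_equal_solve : Prop := ∀ (nums : List Int) (k : Int), Dom_solve nums k → Pre_solve nums k → Spec_solve nums k (solve nums k)

-- ===== LEMMAS AND PROOFS =====
-- window machinery: window = [l, r) of nums
def wseg (nums : List Int) (l r : Nat) : List Int := (nums.drop l).take (r - l)

def winOf (nums : List Int) (l r : Nat) : List (Int × Int) :=
  (List.range' l (r - l)).map (fun j => (nums.getD j 0, (j : Int)))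

def Sg (nums : List Int) (l r : Nat) : Int := (wseg nums l r).sum

def Mx (nums : List Int) (l r : Nat) : Int :=
  (PySem.List.max? (wseg nums l r) (fun x => x)).getD 0

-- the three heap invariants
def C1 (nums : List Int) (r : Nat) (maxs : List (Int × Int)) : Prop :=
  ∀ p ∈ maxs, ∃ j : Nat, j < r ∧ p = (nums.getD j 0, (j : Int))

def C2 (nums : List Int) (l r : Nat) (maxs : List (Int × Int)) : Prop :=
  ∀ j : Nat, l ≤ j → j < r → (nums.getD j 0, (j : Int)) ∈ maxs

def C3 (nums : List Int) (l r : Nat) (maxs : List (Int × Int)) : Prop :=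
  ∀ p ∈ maxs, p.1 ≤ Mx nums l r

theorem hlt_imp_le {q x : Int × Int} (hb : hlt q x = true) : x.1 ≤ q.1 := by
  unfold hlt at hb; by_cases he : q.1 = x.1
  · omega
  · simp [he] at hb; omega

theorem not_hlt_imp_le {q x : Int × Int} (hb : ¬ hlt q x = true) : q.1 ≤ x.1 := by
  unfold hlt at hb; by_cases he : q.1 = x.1
  · omega
  · simp [he] at hb; omega

theorem heapTop_isSome (p : Int × Int) (rest : List (Int × Int)) :
    ∃ t, heapTop (p :: rest) = some t := by
  simp only [heapTop]
  cases heapTop rest with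
  | none => exact ⟨p, rfl⟩
  | some q =>
    by_cases hb : hlt q p = true
    · exact ⟨q, by simp [hb]⟩
    · exact ⟨p, by simp [hb]⟩

theorem heapTop_eq_none {h : List (Int × Int)} : heapTop h = none → h = [] := by
  cases h with
  | nil => intro; rfl
  | cons p rest =>
    intro h1
    obtain ⟨t, ht⟩ := heapTop_isSome p rest
    rw [ht] at h1; cases h1

theorem heapTop_min {h : List (Int × Int)} {t : Int × Int} :
    heapTop h = some t → ∀ p ∈ h, p.1 ≤ t.1 := by
  induction h generalizing t with
  | nil => simp [heapTop]
  | cons x rest ih =>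
    simp only [heapTop]
    cases hr : heapTop rest with
    | none =>
      intro h1 p hp
      simp only [Option.some.injEq] at h1; subst h1
      have := heapTop_eq_none hr; subst this
      simp at hp; simp [hp]
    | some q =>
      intro h1 p hp
      by_cases hb : hlt q x = true
      · simp [hb] at h1; subst h1
        rcases List.mem_cons.1 hp with h | h
        · subst h; exact hlt_imp_le hb
        · exact ih hr p h
      · simp [hb] at h1; subst h1
        rcases List.mem_cons.1 hp with h | h
        · subst h; exact le_refl _
        · exact le_trans (ih hr p h) (not_hlt_imp_le hb)

-- wseg facts
theorem wseg_ne_nil {nums : List Int} {l r : Nat} (hlr : l < r) (hr : r ≤ nums.length) :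
    wseg nums l r ≠ [] := by
  have : (wseg nums l r).length = min (r - l) (nums.length - l) := by
    simp [wseg]
  intro h0
  rw [h0] at this
  simp at this
  omega

theorem mem_wseg_of {nums : List Int} {l r j : Nat} (h1 : l ≤ j) (h2 : j < r)
    (h3 : r ≤ nums.length) : nums.getD j 0 ∈ wseg nums l r := by
  have hj : j < nums.length := lt_of_lt_of_le h2 h3
  have hidx : j - l < (wseg nums l r).length := by
    simp [wseg]; omega
  have hv : (wseg nums l r)[j - l] = nums[j] := by
    simp [wseg, List.getElem_take, List.getElem_drop]
    congr 1
    omega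
  rw [List.getD_eq_getElem nums 0 hj, ← hv]
  exact List.getElem_mem hidx

theorem mem_wseg {nums : List Int} {l r : Nat} {x : Int} (hx : x ∈ wseg nums l r) :
    ∃ j : Nat, l ≤ j ∧ j < r ∧ j < nums.length ∧ x = nums.getD j 0 := by
  obtain ⟨i, hi, hv⟩ := List.mem_iff_getElem.1 hx
  have hlen : (wseg nums l r).length = min (r - l) (nums.length - l) := by simp [wseg]
  have hi' : i < r - l ∧ i < nums.length - l := by omega
  refine ⟨l + i, by omega, by omega, by omega, ?_⟩
  rw [← hv]
  have : (wseg nums l r)[i] = nums[l + i] := by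
    simp [wseg, List.getElem_take, List.getElem_drop]
  rw [this, List.getD_eq_getElem nums 0 (by omega)]

theorem max?_wseg {nums : List Int} {l r : Nat} (hlr : l < r) (hr : r ≤ nums.length) :
    PySem.List.max? (wseg nums l r) (fun x => x) = some (Mx nums l r) := by
  cases hm : PySem.List.max? (wseg nums l r) (fun x => x) with
  | none => exact absurd ((PySem.List.max?_eq_none_iff _ _).1 hm) (wseg_ne_nil hlr hr)
  | some m => rw [Mx, hm]; rfl

theorem Mx_isMax {nums : List Int} {l r : Nat} {x : Int} (hlr : l < r) (hr : r ≤ nums.length)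
    (hx : x ∈ wseg nums l r) : x ≤ Mx nums l r :=
  PySem.List.max?_isMax (max?_wseg hlr hr) x hx

theorem Mx_mem {nums : List Int} {l r : Nat} (hlr : l < r) (hr : r ≤ nums.length) :
    ∃ j : Nat, l ≤ j ∧ j < r ∧ Mx nums l r = nums.getD j 0 := by
  obtain ⟨j, h1, h2, _, h4⟩ := mem_wseg (PySem.List.max?_mem (max?_wseg hlr hr))
  exact ⟨j, h1, h2, h4⟩

theorem wseg_cons {nums : List Int} {l r : Nat} (hlr : l < r) (hr : r ≤ nums.length) :
    wseg nums l r = nums.getD l 0 :: wseg nums (l + 1) r := by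
  have hl : l < nums.length := lt_of_lt_of_le hlr hr
  rw [wseg, List.drop_eq_getElem_cons hl]
  have : r - l = (r - (l + 1)) + 1 := by omega
  rw [this, List.take_succ_cons, ← List.getD_eq_getElem nums 0 hl]
  rfl

theorem wseg_snoc {nums : List Int} {l r : Nat} (hlr : l ≤ r) (hr : r < nums.length) :
    wseg nums l (r + 1) = wseg nums l r ++ [nums.getD r 0] := by
  have h1 : r + 1 - l = (r - l) + 1 := by omega
  rw [wseg, h1, List.take_succ]
  congr 1
  have hi : r - l < (nums.drop l).length := by simp; omega
  rw [List.getElem?_eq_getElem hi]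
  have h2 : (nums.drop l)[r - l] = nums[r] := by
    rw [List.getElem_drop]
    congr 1
    omega
  rw [h2, List.getD_eq_getElem nums 0 hr]
  rfl

theorem winOf_cons {nums : List Int} {l r : Nat} (hlr : l < r) :
    winOf nums l r = (nums.getD l 0, (l : Int)) :: winOf nums (l + 1) r := by
  have : r - l = (r - (l + 1)) + 1 := by omega
  rw [winOf, this, List.range'_succ]
  rfl

theorem winOf_snoc {nums : List Int} {l r : Nat} (hlr : l ≤ r) :
    winOf nums l (r + 1) = winOf nums l r ++ [(nums.getD r 0, (r : Int))] := by
  have h1 : r + 1 - l = (r - l) + 1 := by omega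
  rw [winOf, h1, List.range'_concat]
  have h2 : l + 1 * (r - l) = r := by omega
  rw [h2, List.map_append]
  rfl

theorem winOf_length {nums : List Int} (l r : Nat) :
    (winOf nums l r).length = r - l := by
  simp [winOf]

theorem Sg_cons {nums : List Int} {l r : Nat} (hlr : l < r) (hr : r ≤ nums.length) :
    Sg nums l r = nums.getD l 0 + Sg nums (l + 1) r := by
  rw [Sg, wseg_cons hlr hr, List.sum_cons]; rfl

theorem Sg_snoc {nums : List Int} {l r : Nat} (hlr : l ≤ r) (hr : r < nums.length) :
    Sg nums l (r + 1) = Sg nums l r + nums.getD r 0 := by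
  rw [Sg, wseg_snoc hlr hr]; simp [Sg]

theorem Mx_mono {nums : List Int} {l r : Nat} (hlr : l < r) (hr : r < nums.length) :
    Mx nums l r ≤ Mx nums l (r + 1) := by
  obtain ⟨j, h1, h2, h4⟩ := Mx_mem hlr (le_of_lt hr)
  rw [h4]
  exact Mx_isMax (by omega) (by omega) (mem_wseg_of h1 (by omega) (by omega))

theorem topSpec {nums : List Int} {l r : Nat} {maxs : List (Int × Int)}
    (hlr : l < r) (hr : r ≤ nums.length)
    (h1 : C1 nums r maxs) (h2 : C2 nums l r maxs) (h3 : C3 nums l r maxs) :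
    ∃ t, heapTop maxs = some t ∧ t.1 = Mx nums l r := by
  have hmem := h2 l (le_refl l) hlr
  obtain ⟨p0, rest0, hm0⟩ : ∃ p0 rest0, maxs = p0 :: rest0 := by
    cases maxs with
    | nil => cases hmem
    | cons a b => exact ⟨a, b, rfl⟩
  obtain ⟨t, ht'⟩ := heapTop_isSome p0 rest0
  have ht : heapTop maxs = some t := by rw [hm0]; exact ht'
  refine ⟨t, ht, le_antisymm (h3 t (heapTop_mem ht)) ?_⟩
  obtain ⟨j, hj1, hj2, hj4⟩ := Mx_mem hlr hr
  rw [hj4]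
  exact heapTop_min ht _ (h2 j hj1 hj2)

theorem purge_spec {nums : List Int} {l r : Nat} (hlr : l + 1 < r) (hr : r ≤ nums.length) :
    ∀ (n : Nat) (maxs : List (Int × Int)), maxs.length ≤ n →
      C1 nums r maxs → C2 nums (l + 1) r maxs →
      C1 nums r (purge maxs ((l : Int) + 1)) ∧ C2 nums (l + 1) r (purge maxs ((l : Int) + 1)) ∧
      C3 nums (l + 1) r (purge maxs ((l : Int) + 1)) := by
  intro n
  induction n with
  | zero =>
    intro maxs hn h1 h2
    have : maxs = [] := by
      cases maxs with
      | nil => rfl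
      | cons a b => simp at hn
    subst this
    cases h2 (l + 1) (le_refl _) hlr
  | succ n ih =>
    intro maxs hn h1 h2
    rw [purge]
    cases hm : heapTop maxs with
    | none =>
      have := heapTop_eq_none hm
      subst this
      cases h2 (l + 1) (le_refl _) hlr
    | some t =>
      by_cases hb : t.2 < (l : Int) + 1
      · simp only [hb, if_true]
        have htm := heapTop_mem hm
        have hlen : (maxs.erase t).length = maxs.length - 1 := List.length_erase_of_mem htm
        have hlen' : maxs.length ≠ 0 := by
          intro h0; rw [List.length_eq_zero_iff] at h0; subst h0; cases htm
        refine ih (maxs.erase t) (by omega) ?_ ?_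
        · intro p hp
          exact h1 p (List.mem_of_mem_erase hp)
        · intro j hj1 hj2
          have hne : (nums.getD j 0, (j : Int)) ≠ t := by
            intro he
            have : (j : Int) = t.2 := by rw [← he]
            omega
          exact (List.mem_erase_of_ne hne).2 (h2 j hj1 hj2)
      · simp only [hb, if_false]
        refine ⟨h1, h2, ?_⟩
        intro p hp
        have hp1 : p.1 ≤ t.1 := heapTop_min hm p hp
        obtain ⟨j, hj1, hj2⟩ := h1 t (heapTop_mem hm)
        have hj3 : l + 1 ≤ j := by
          have : t.2 = (j : Int) := by rw [hj2]
          omega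
        refine le_trans hp1 ?_
        have : t.1 = nums.getD j 0 := by rw [hj2]
        rw [this]
        exact Mx_isMax hlr hr (mem_wseg_of hj3 hj1 hr)

theorem shrink_stop {k sum : Int} {window maxs : List (Int × Int)} {t : Int × Int}
    (ht : heapTop maxs = some t) (hcond : ¬ (t.1 * (window.length : Int) - sum > k)) :
    shrink k window sum maxs = (window, sum, maxs) := by
  rw [shrink.eq_def]
  rw [ht]
  simp only [if_neg hcond]

theorem shrink_step {k sum : Int} {w0 w1 : Int × Int} {wrest maxs : List (Int × Int)} {t : Int × Int}
    (ht : heapTop maxs = some t)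
    (hcond : t.1 * (((w0 :: w1 :: wrest) : List (Int × Int)).length : Int) - sum > k) :
    shrink k (w0 :: w1 :: wrest) sum maxs = shrink k (w1 :: wrest) (sum - w0.1) (purge maxs w1.2) := by
  rw [shrink.eq_def]
  rw [ht]
  simp only [if_pos hcond]

theorem shrinkB_stop {nums : List Int} {k right s m : Int} {left : Nat}
    (hmax : PySem.List.max? (PySem.List.slice nums (some (left : Int)) (some (right + 1))) (fun x => x) = some m)
    (hcond : ¬ (m * (right + 1 - (left : Int)) - s > k)) :
    shrinkB nums k right left s = (left, s) := by
  rw [shrinkB.eq_def]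
  split
  · rfl
  · rename_i m' hmx
    rw [hmax] at hmx
    injection hmx with hmx
    subst hmx
    rw [if_neg hcond]

theorem shrinkB_step {nums : List Int} {k right s m : Int} {left : Nat}
    (hmax : PySem.List.max? (PySem.List.slice nums (some (left : Int)) (some (right + 1))) (fun x => x) = some m)
    (hcond : m * (right + 1 - (left : Int)) - s > k) :
    shrinkB nums k right left s = shrinkB nums k right (left + 1) (s - PySem.List.pyGetD nums (left : Int) 0) := by
  rw [shrinkB.eq_def]
  split
  · rename_i hmx
    rw [hmax] at hmx
    cases hmx
  · rename_i m' hmx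
    rw [hmax] at hmx
    injection hmx with hmx
    subst hmx
    rw [if_pos hcond]

theorem shrink_sim {nums : List Int} {k : Int} (hk : 0 ≤ k) {r : Nat} (hr : r ≤ nums.length) :
    ∀ (c l : Nat) (maxs : List (Int × Int)), r - l ≤ c → l < r →
      C1 nums r maxs → C2 nums l r maxs → C3 nums l r maxs →
      ∃ (l' : Nat) (maxs' : List (Int × Int)), l ≤ l' ∧ l' < r ∧
        shrink k (winOf nums l r) (Sg nums l r) maxs = (winOf nums l' r, Sg nums l' r, maxs') ∧
        C1 nums r maxs' ∧ C2 nums l' r maxs' ∧ C3 nums l' r maxs' ∧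
        shrinkB nums k ((r : Int) - 1) l (Sg nums l r) = (l', Sg nums l' r) := by
  intro c
  induction c with
  | zero =>
    intro l maxs hc hlr h1 h2 h3
    omega
  | succ c ih =>
    intro l maxs hc hlr h1 h2 h3
    obtain ⟨t, ht, htv⟩ := topSpec hlr hr h1 h2 h3
    have hcast : ((r - l : Nat) : Int) = (r : Int) - (l : Int) := by omega
    have hmax := max?_wseg hlr hr
    have hr1 : ((r : Int) - 1) + 1 = ((r : Nat) : Int) := by ring
    have hslice : PySem.List.slice nums (some ((l : Nat) : Int)) (some (((r : Int) - 1) + 1)) = wseg nums l r := by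
      rw [hr1, PySem.List.slice_natCast]
      rfl
    have hmaxB : PySem.List.max? (PySem.List.slice nums (some ((l : Nat) : Int)) (some (((r : Int) - 1) + 1))) (fun x => x) = some (Mx nums l r) := by
      rw [hslice]; exact hmax
    have hlenA : ((winOf nums l r).length : Int) = (r : Int) - (l : Int) := by
      rw [winOf_length]; omega
    by_cases hd : Mx nums l r * ((r : Int) - (l : Int)) - Sg nums l r > k
    · have hl1 : l + 1 < r := by
        by_contra hno
        have hle : r = l + 1 := by omega
        subst hle
        have hw : wseg nums l (l + 1) = [nums.getD l 0] := by
          rw [wseg_cons (by omega) hr]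
          simp [wseg]
        have hMx : Mx nums l (l + 1) = nums.getD l 0 := by
          rw [Mx, hw]
          simp [PySem.List.max?]
        have hSg : Sg nums l (l + 1) = nums.getD l 0 := by
          rw [Sg, hw]; simp
        rw [hMx, hSg] at hd
        push_cast at hd
        have : ((l : Int) + 1) - l = 1 := by ring
        rw [this, mul_one] at hd
        omega
      have hwin : winOf nums l r = (nums.getD l 0, (l : Int)) :: winOf nums (l + 1) r := winOf_cons hlr
      have hwin2 : winOf nums (l + 1) r = (nums.getD (l + 1) 0, ((l + 1 : Nat) : Int)) :: winOf nums (l + 2) r := winOf_cons hl1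
      have hC2' : C2 nums (l + 1) r maxs := fun j hj1 hj2 => h2 j (by omega) hj2
      obtain ⟨hC1', hC2'', hC3'⟩ := purge_spec hl1 hr maxs.length maxs (le_refl _) h1 hC2'
      obtain ⟨l', maxs', hll', hl'r, hshr, g1, g2, g3, hB⟩ :=
        ih (l + 1) (purge maxs ((l : Int) + 1)) (by omega) hl1 hC1' hC2'' hC3'
      have hsum : Sg nums l r - nums.getD l 0 = Sg nums (l + 1) r := by
        have := Sg_cons hlr hr
        omega
      refine ⟨l', maxs', by omega, hl'r, ?_, g1, g2, g3, ?_⟩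
      · rw [hwin, hwin2]
        rw [shrink_step ht ?cond]
        case cond =>
          rw [← hwin2, ← hwin, htv, hlenA]
          exact hd
        rw [← hwin2]
        have hc1 : (((l + 1 : Nat) : Nat) : Int) = (l : Int) + 1 := by push_cast; ring
        simp only []
        rw [hc1, hsum]
        exact hshr
      · rw [shrinkB_step hmaxB (by rw [hr1, hcast] at *; linarith)]
        rw [PySem.List.pyGetD_natCast]
        have : nums.getD l 0 = nums.getD l 0 := rfl
        rw [hsum]
        exact hB
    · refine ⟨l, maxs, le_refl l, hlr, ?_, h1, h2, h3, ?_⟩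
      · exact shrink_stop ht (by rw [htv, hlenA]; exact hd)
      · refine shrinkB_stop hmaxB ?_
        rw [hr1]
        push_cast at hd ⊢
        linarith

theorem loop_sim {nums : List Int} {k : Int} (hk : 0 ≤ k) :
    ∀ (rest : List Int) (r l : Nat) (maxs : List (Int × Int)) (soln : Int),
      nums.drop r = rest → l ≤ r → (l < r ∨ maxs = []) →
      C1 nums r maxs → C2 nums l r maxs → C3 nums l r maxs →
      ((PySem.List.enumerate rest (r : Int)).foldl (stepA k)
          (winOf nums l r, Sg nums l r, maxs, soln)).2.2.2
        = ((PySem.List.enumerate rest (r : Int)).foldl (stepB nums k) (l, Sg nums l r, soln)).2.2 := by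
  intro rest
  induction rest with
  | nil => intro r l maxs soln _ _ _ _ _ _; rfl
  | cons x rest' ih =>
    intro r l maxs soln hdrop hlr hinit h1 h2 h3
    have hrlen : r < nums.length := by
      by_contra hge
      rw [List.drop_eq_nil_of_le (by omega)] at hdrop
      cases hdrop
    have hx : nums.getD r 0 = x := by
      have h0 : (nums.drop r)[0]'(by rw [hdrop]; simp) = x := by
        simp [hdrop]
      rw [List.getElem_drop] at h0
      rw [List.getD_eq_getElem nums 0 hrlen, ← h0]
      congr 1
    have hdrop' : nums.drop (r + 1) = rest' := by
      have : nums.drop (r + 1) = (nums.drop r).drop 1 := by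
        rw [List.drop_drop]
      rw [this, hdrop]
      rfl
    have hwin : winOf nums l r ++ [(x, (r : Int))] = winOf nums l (r + 1) := by
      rw [winOf_snoc hlr, hx]
    have hsum : Sg nums l r + x = Sg nums l (r + 1) := by
      rw [Sg_snoc hlr hrlen, hx]
    have hC1 : C1 nums (r + 1) (maxs ++ [(x, (r : Int))]) := by
      intro p hp
      rcases List.mem_append.1 hp with h | h
      · obtain ⟨j, hj1, hj2⟩ := h1 p h
        exact ⟨j, by omega, hj2⟩
      · simp at h
        exact ⟨r, by omega, by rw [h, hx]⟩
    have hC2 : C2 nums l (r + 1) (maxs ++ [(x, (r : Int))]) := by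
      intro j hj1 hj2
      by_cases hjr : j < r
      · exact List.mem_append.2 (Or.inl (h2 j hj1 hjr))
      · have : j = r := by omega
        subst this
        rw [hx]
        simp
    have hC3 : C3 nums l (r + 1) (maxs ++ [(x, (r : Int))]) := by
      intro p hp
      rcases List.mem_append.1 hp with h | h
      · rcases hinit with hlt | hnil
        · exact le_trans (h3 p h) (Mx_mono hlt hrlen)
        · rw [hnil] at h; cases h
      · simp at h
        rw [h]
        rw [← hx]
        exact Mx_isMax (by omega) (by omega) (mem_wseg_of hlr (by omega) (by omega))
    obtain ⟨l', maxs', hll', hl'r, hshr, g1, g2, g3, hB⟩ :=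
      shrink_sim hk (r := r + 1) (by omega) (r + 1 - l) l (maxs ++ [(x, (r : Int))])
        (le_refl _) (by omega) hC1 hC2 hC3
    have hcast2 : ((r + 1 : Nat) : Int) - 1 = (r : Int) := by push_cast; ring
    rw [hcast2] at hB
    have hlen' : ((winOf nums l' (r + 1)).length : Int) = (r : Int) + 1 - (l' : Int) := by
      rw [winOf_length]; omega
    have hstepA : stepA k (winOf nums l r, Sg nums l r, maxs, soln) ((r : Int), x)
        = (winOf nums l' (r + 1), Sg nums l' (r + 1), maxs',
            max soln ((r : Int) + 1 - (l' : Int))) := by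
      simp only [stepA]
      rw [hwin, hsum, hshr, hlen']
    have hstepB : stepB nums k (l, Sg nums l r, soln) ((r : Int), x)
        = (l', Sg nums l' (r + 1), max soln ((r : Int) + 1 - (l' : Int))) := by
      simp only [stepB]
      rw [hsum, hB]
    rw [PySem.List.enumerate_cons]
    simp only [List.foldl_cons]
    rw [hstepA, hstepB]
    have hcast3 : (r : Int) + 1 = ((r + 1 : Nat) : Int) := by push_cast; ring
    rw [hcast3]
    exact ih (r + 1) l' maxs' (max soln ((r : Int) + 1 - (l' : Int))) hdrop'
      (by omega) (Or.inl hl'r) g1 g2 g3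

-- ===== VERDICT (by name: the statement is the Claim_ definition above) =====
theorem solve_spec : Claim_equal_solve := by
  intro nums k _ hpre
  unfold Spec_solve solve solve_alt
  rcases hpre with hk | hnil
  · have h0 := loop_sim (nums := nums) hk nums 0 0 [] 0 rfl (le_refl 0) (Or.inr rfl)
      (by intro p hp; cases hp) (by intro j h1 h2; omega) (by intro p hp; cases hp)
    simpa [winOf, Sg, wseg] using h0
  · subst hnil; rfl
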